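-- pv_equiv track=rewrite | github.com/FabianMoertter/NA2AA | na2aa/na2aa.py | get_longest_aa_sequence
-- ===== SOURCE A (Python) =====
-- def get_longest_aa_sequence(aa_sequence, start_amino_acid="M"):
--     """
--     Takes as input an unmodified amino acid sequence as produced by translate_mRNA()
--     Amino acid sequences start with a methionine and end with a stop codon.
--     """
--     split = aa_sequence.split("*")
--
--     trimmed_sequences = []
--     for sequence in split:
--         start = sequence.find(start_amino_acid)
--         if start != -1:
--             trimmed_sequences.append(sequence[start:])
--     if trimmed_sequences:
--         return max(trimmed_sequences, key=len)
--     else: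
--         return ""
-- ===== SOURCE B (Python) =====
-- import re
--
-- def get_longest_aa_sequence(aa_sequence, start_amino_acid="M"):
--     candidates = re.findall(re.escape(start_amino_acid) + r"[^*]*", aa_sequence)
--     return max(candidates, key=len) if candidates else ""
-- ===== Notes on version B (the rewrite author's own statement) =====
-- stated objective: idiomatic
-- what changed: Replaces the split/find/slice loop that builds a trimmed-candidates list with a single declarative regex scan (re.findall of the escaped start marker followed by a run of non-stop characters) and then max(candidates, key=len).
-- outside the precondition, e.g. on get_longest_aa_sequence('A*X', '*'): A returns '', B returns '*X'
import Mathlib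
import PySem

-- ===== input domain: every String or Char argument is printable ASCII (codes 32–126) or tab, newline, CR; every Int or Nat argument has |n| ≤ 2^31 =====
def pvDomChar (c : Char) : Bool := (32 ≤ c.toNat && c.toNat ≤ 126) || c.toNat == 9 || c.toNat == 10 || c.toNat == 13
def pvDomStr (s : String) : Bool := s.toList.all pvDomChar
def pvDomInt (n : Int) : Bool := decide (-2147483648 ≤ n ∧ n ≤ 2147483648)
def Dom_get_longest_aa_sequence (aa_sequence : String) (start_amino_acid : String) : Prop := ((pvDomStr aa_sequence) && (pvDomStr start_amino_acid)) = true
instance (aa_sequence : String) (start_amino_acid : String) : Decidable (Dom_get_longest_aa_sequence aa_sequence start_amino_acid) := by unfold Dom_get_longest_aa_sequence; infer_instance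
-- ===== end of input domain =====

-- B replaces A's split/find/slice candidate loop by one regex-style scan (re.findall of the
-- escaped start marker followed by a run of non-stop characters) and the same
-- first-maximum-by-length selection; same cost, more idiomatic Python.  Equivalence is proved
-- on Pre_ (markers with a stop symbol occurring in the sequence are excluded).


-- ===== PORT A =====
-- split on "*", trim each piece from the first occurrence of the start marker, first max by len
def get_longest_aa_sequence (aa_sequence : String) (start_amino_acid : String) : String :=
  let split := PySem.Chars.splitOn aa_sequence.toList ['*']
  let trimmed_sequences := split.foldl
    (fun acc sequence =>
      let start := PySem.Chars.find sequence start_amino_acid.toList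
      if start ≠ -1 then acc ++ [PySem.Chars.slice sequence (some start) none] else acc)
    ([] : List (List Char))
  match PySem.List.max? trimmed_sequences (fun t => t.length) with
  | some m => String.ofList m
  | none => ""

-- ===== PORT B =====
-- Hand port of re.findall(re.escape(s) + "[^*]*", text): scan left to right; at a position where
-- the literal s matches, the match is s plus the following run of non-'*' characters and scanning
-- resumes after it (after an empty match, one position further); otherwise move one position on.
def pvScanB (s : List Char) (t : List Char) : List (List Char) :=
  if _hp : s.isPrefixOf t then
    if _hm : s ++ (t.drop s.length).takeWhile (· ≠ '*') = [] then
      match t with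
      | [] => [[]]
      | _ :: t' => [] :: pvScanB s t'
    else
      (s ++ (t.drop s.length).takeWhile (· ≠ '*')) ::
        pvScanB s (t.drop (s ++ (t.drop s.length).takeWhile (· ≠ '*')).length)
  else
    match t with
    | [] => []
    | _ :: t' => pvScanB s t'
termination_by t.length
decreasing_by
  · simp
  · have h1 : s.length ≤ t.length := (List.isPrefixOf_iff_prefix.mp _hp).length_le
    have h2 : ((t.drop s.length).takeWhile (· ≠ '*')).length ≤ t.length - s.length := by
      have := (List.takeWhile_prefix (l := t.drop s.length) (fun c => c ≠ '*')).length_le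
      simpa using this
    have h3 : (s ++ (t.drop s.length).takeWhile (· ≠ '*')).length ≠ 0 := by
      simpa [List.length_eq_zero_iff] using _hm
    simp only [List.length_drop, List.length_append] at *
    omega
  · simp

def get_longest_aa_sequence_alt (aa_sequence : String) (start_amino_acid : String) : String :=
  let candidates := pvScanB start_amino_acid.toList aa_sequence.toList
  match PySem.List.max? candidates (fun t => t.length) with
  | some m => String.ofList m
  | none => ""

-- ===== PRECONDITION & SPEC =====
-- Pre_ excludes only the inputs where the start marker contains the stop symbol AND occurs in
-- the sequence — a degenerate marker the function's purpose (an amino-acid start letter) never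
-- supplies; there A's find inside the stop-split pieces never matches (A returns the empty
-- string) while B's regex match spans a stop marker, and neither accidental behaviour is the
-- specified one.  A raises nowhere; it returns on all inputs.
def Pre_get_longest_aa_sequence (aa_sequence : String) (start_amino_acid : String) : Prop :=
  '*' ∉ start_amino_acid.toList ∨ ¬ (start_amino_acid.toList <:+: aa_sequence.toList)
instance (aa_sequence : String) (start_amino_acid : String) : Decidable (Pre_get_longest_aa_sequence aa_sequence start_amino_acid) := by unfold Pre_get_longest_aa_sequence; infer_instance

def pvWitness_get_longest_aa_sequence : String × String := ("MAB*XMCDE", "M")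

def Spec_get_longest_aa_sequence (aa_sequence : String) (start_amino_acid : String) (out : String) : Prop := out = get_longest_aa_sequence_alt aa_sequence start_amino_acid
instance (aa_sequence : String) (start_amino_acid : String) (out : String) : Decidable (Spec_get_longest_aa_sequence aa_sequence start_amino_acid out) := by unfold Spec_get_longest_aa_sequence; infer_instance

-- ===== CLAIM (what is proved, stated in full; the proofs are below) =====
def Claim_equal_get_longest_aa_sequence : Prop := ∀ (aa_sequence : String) (start_amino_acid : String), Dom_get_longest_aa_sequence aa_sequence start_amino_acid → Pre_get_longest_aa_sequence aa_sequence start_amino_acid → Spec_get_longest_aa_sequence aa_sequence start_amino_acid (get_longest_aa_sequence aa_sequence start_amino_acid)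

-- ===== LEMMAS AND PROOFS =====

-- split on '*' as a simple structural recursion (proof-side mirror of PySem.Chars.splitOn _ ['*'])
def pvSplitStar : List Char → List (List Char)
  | [] => [[]]
  | c :: t => if c = '*' then [] :: pvSplitStar t else (pvSplitStar t).modifyHead (c :: ·)

-- A's per-piece contribution
def pvTrimA (s g : List Char) : List (List Char) :=
  if PySem.Chars.find g s = -1 then [] else [g.drop (PySem.Chars.find g s).toNat]

-- B's padding of the pieces: an extra empty match after each nonempty piece
def pvPad (g : List Char) : List (List Char) := if g = [] then [[]] else [g, []]

theorem pvSplitStar_ne_nil (l : List Char) : pvSplitStar l ≠ [] := by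
  cases l with
  | nil => simp [pvSplitStar]
  | cons c t =>
      simp only [pvSplitStar]
      split
      · simp
      · cases h : pvSplitStar t with
        | nil => exact absurd h (pvSplitStar_ne_nil t)
        | cons a b => simp [List.modifyHead]

theorem pvSplitStar_decomp (l : List Char) :
    pvSplitStar l = l.takeWhile (· ≠ '*') ::
      (match l.dropWhile (· ≠ '*') with | [] => [] | _ :: r => pvSplitStar r) := by
  induction l with
  | nil => simp [pvSplitStar]
  | cons c t ih =>
      by_cases hc : c = '*'
      · subst hc; simp [pvSplitStar]
      · simp only [pvSplitStar, List.takeWhile_cons, List.dropWhile_cons,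
          decide_eq_true_eq, hc, if_pos, ih]
        simp [List.modifyHead, hc]

theorem pvGo_nil (f : Nat) (cur : List Char) (acc : List (List Char)) :
    PySem.Chars.splitOn.go ['*'] (f+1) [] cur acc = (cur.reverse :: acc).reverse := by
  simp [PySem.Chars.splitOn.go]

theorem pvGo_star (f : Nat) (rest cur : List Char) (acc : List (List Char)) :
    PySem.Chars.splitOn.go ['*'] (f+1) ('*' :: rest) cur acc
      = PySem.Chars.splitOn.go ['*'] f rest [] (cur.reverse :: acc) := by
  simp [PySem.Chars.splitOn.go]

theorem pvGo_cons (f : Nat) (c : Char) (hc : c ≠ '*') (rest cur : List Char) (acc : List (List Char)) :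
    PySem.Chars.splitOn.go ['*'] (f+1) (c :: rest) cur acc
      = PySem.Chars.splitOn.go ['*'] f rest (c :: cur) acc := by
  simp only [PySem.Chars.splitOn.go]
  rw [if_neg (by simp [Ne.symm hc])]

theorem pvSplitOn_go_spec (fuel : Nat) (l cur : List Char) (acc : List (List Char))
    (h : l.length < fuel) :
    PySem.Chars.splitOn.go ['*'] fuel l cur acc
      = acc.reverse ++ (pvSplitStar l).modifyHead (cur.reverse ++ ·) := by
  induction fuel generalizing l cur acc with
  | zero => omega
  | succ f ih =>
      cases l with
      | nil => simp [pvGo_nil, pvSplitStar, List.modifyHead]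
      | cons c rest =>
          by_cases hc : c = '*'
          · subst hc
            rw [pvGo_star, ih _ _ _ (by simp at h ⊢; omega)]
            simp only [pvSplitStar, if_pos]
            cases hsp : pvSplitStar rest with
            | nil => exact absurd hsp (pvSplitStar_ne_nil rest)
            | cons a b => simp [List.modifyHead]
          · rw [pvGo_cons _ _ hc, ih _ _ _ (by simp at h ⊢; omega)]
            simp only [pvSplitStar, if_neg hc]
            cases hsp : pvSplitStar rest with
            | nil => exact absurd hsp (pvSplitStar_ne_nil rest)
            | cons a b => simp [List.modifyHead]

theorem pvSplitOn_star (l : List Char) : PySem.Chars.splitOn l ['*'] = pvSplitStar l := by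
  unfold PySem.Chars.splitOn
  rw [pvSplitOn_go_spec _ _ _ _ (by omega)]
  have : (pvSplitStar l).modifyHead (fun x => ([] : List Char).reverse ++ x) = pvSplitStar l := by
    cases h : pvSplitStar l <;> simp [List.modifyHead]
  simpa using this

theorem pvFind_go_shift (sub l : List Char) (k : Nat) :
    PySem.Chars.find.go sub l k
      = if PySem.Chars.find l sub = -1 then -1 else PySem.Chars.find l sub + k := by
  induction l generalizing k with
  | nil =>
      simp only [PySem.Chars.find, PySem.Chars.find.go]
      by_cases h : sub.isEmpty <;> simp [h]
  | cons c t ih =>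
      simp only [PySem.Chars.find, PySem.Chars.find.go] at *
      by_cases h : sub.isPrefixOf (c :: t)
      · simp [h]
      · have hb' : -1 ≤ PySem.Chars.find.go sub t 0 := by
          have := PySem.Chars.neg_one_le_find t sub
          simpa [PySem.Chars.find] using this
        simp only [h, Bool.false_eq_true, if_false]
        rw [ih (k+1), ih 1]
        split <;> push_cast <;> omega

theorem pvFind_of_prefix (s l : List Char) (h : s.isPrefixOf l) : PySem.Chars.find l s = 0 := by
  cases l with
  | nil =>
      have : s = [] := by simpa using List.isPrefixOf_iff_prefix.mp h
      simp [this, PySem.Chars.find, PySem.Chars.find.go]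
  | cons c t => simp [PySem.Chars.find, PySem.Chars.find.go, h]

theorem pvFind_nil_of_ne (s : List Char) (h : s ≠ []) : PySem.Chars.find [] s = -1 := by
  simp [PySem.Chars.find, PySem.Chars.find.go, List.isEmpty_iff, h]

theorem pvTrimA_nil (s : List Char) (hs : s ≠ []) : pvTrimA s [] = [] := by
  simp [pvTrimA, pvFind_nil_of_ne s hs]

theorem pvFind_cons_of_not_prefix (s g : List Char) (c : Char) (h : ¬ s.isPrefixOf (c :: g)) :
    PySem.Chars.find (c :: g) s
      = if PySem.Chars.find g s = -1 then -1 else PySem.Chars.find g s + 1 := by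
  have : PySem.Chars.find (c :: g) s = PySem.Chars.find.go s g 1 := by
    simp [PySem.Chars.find, PySem.Chars.find.go, h]
  rw [this, pvFind_go_shift]; norm_num

theorem pvTrimA_cons_of_not_prefix (s g : List Char) (c : Char)
    (h : ¬ s.isPrefixOf (c :: g)) : pvTrimA s (c :: g) = pvTrimA s g := by
  unfold pvTrimA
  rw [pvFind_cons_of_not_prefix s g c h]
  by_cases hf : PySem.Chars.find g s = -1
  · simp [hf]
  · have hb : -1 ≤ PySem.Chars.find g s := PySem.Chars.neg_one_le_find g s
    have h1 : PySem.Chars.find g s + 1 ≠ -1 := by omega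
    have h2 : (PySem.Chars.find g s + 1).toNat = (PySem.Chars.find g s).toNat + 1 := by omega
    simp [hf, h1, h2]

theorem pvTrimA_of_prefix (s m : List Char) (h : s.isPrefixOf m) : pvTrimA s m = [m] := by
  simp [pvTrimA, pvFind_of_prefix s m h]

-- A's foldl as flatMap over the pieces
theorem pvFoldl_trim (s : List Char) (xs : List (List Char)) (acc : List (List Char)) :
    xs.foldl
      (fun acc g =>
        if PySem.Chars.find g s ≠ -1 then acc ++ [PySem.Chars.slice g (some (PySem.Chars.find g s)) none] else acc)
      acc = acc ++ xs.flatMap (pvTrimA s) := by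
  induction xs generalizing acc with
  | nil => simp
  | cons g xs ih =>
      rw [List.foldl_cons, ih, List.flatMap_cons]
      have hstep : (if PySem.Chars.find g s ≠ -1 then acc ++ [PySem.Chars.slice g (some (PySem.Chars.find g s)) none] else acc)
          = acc ++ pvTrimA s g := by
        by_cases hf : PySem.Chars.find g s = -1
        · simp [hf, pvTrimA]
        · have h0 : 0 ≤ PySem.Chars.find g s := by
            have := PySem.Chars.neg_one_le_find g s; omega
          simp [hf, pvTrimA, PySem.Chars.slice, PySem.List.slice_from _ h0]
      rw [hstep, List.append_assoc]

theorem pvScanB_nil_t (s : List Char) : pvScanB s [] = if s = [] then [[]] else [] := by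
  by_cases hs : s = []
  · subst hs; simp [pvScanB]
  · rw [pvScanB]
    have : s.isPrefixOf ([] : List Char) = false := by
      cases s with
      | nil => simp at hs
      | cons a b => simp [List.isPrefixOf]
    simp [this, hs]

theorem pvScanB_not_prefix (s : List Char) (c : Char) (t : List Char)
    (h : ¬ s.isPrefixOf (c :: t)) : pvScanB s (c :: t) = pvScanB s t := by
  rw [pvScanB]; simp [h]

theorem pvScanB_star (s : List Char) (t : List Char) (hs : s ≠ []) (hstar : '*' ∉ s) :
    pvScanB s ('*' :: t) = pvScanB s t := by
  apply pvScanB_not_prefix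
  intro h
  cases s with
  | nil => exact hs rfl
  | cons a b =>
      have := List.isPrefixOf_iff_prefix.mp h
      rw [List.cons_prefix_cons] at this
      exact hstar (this.1 ▸ List.mem_cons_self)

theorem pvScanB_prefix (s : List Char) (t : List Char) (hs : s ≠ []) (hp : s.isPrefixOf t) :
    pvScanB s t
      = (s ++ (t.drop s.length).takeWhile (· ≠ '*')) ::
          pvScanB s (t.drop (s ++ (t.drop s.length).takeWhile (· ≠ '*')).length) := by
  rw [pvScanB]
  have hm : s ++ (t.drop s.length).takeWhile (· ≠ '*') ≠ [] := by simp [hs]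
  simp [hp, hm]
  exact fun h _ => absurd h hs

theorem pvTW_append (s rest : List Char) (hstar : '*' ∉ s) :
    (s ++ rest).takeWhile (· ≠ '*') = s ++ rest.takeWhile (· ≠ '*') := by
  induction s with
  | nil => simp
  | cons a b ih =>
      have ha : a ≠ '*' := fun h => hstar (h ▸ List.mem_cons_self)
      simp only [List.cons_append, List.takeWhile_cons]
      rw [if_pos (by simpa using ha), ih (fun h => hstar (List.mem_cons_of_mem a h))]

theorem pvDW_append (s rest : List Char) (hstar : '*' ∉ s) :
    (s ++ rest).dropWhile (· ≠ '*') = rest.dropWhile (· ≠ '*') := by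
  induction s with
  | nil => simp
  | cons a b ih =>
      have ha : a ≠ '*' := fun h => hstar (h ▸ List.mem_cons_self)
      simp only [List.cons_append, List.dropWhile_cons]
      rw [if_pos (by simpa using ha)]
      exact ih (fun h => hstar (List.mem_cons_of_mem a h))

theorem pvDW_head (l : List Char) (d : Char) (r : List Char)
    (h : l.dropWhile (· ≠ '*') = d :: r) : d = '*' := by
  induction l with
  | nil => simp at h
  | cons a b ih =>
      by_cases ha : a = '*'
      · subst ha
        simp [List.dropWhile_cons] at h
        exact h.1.symm
      · rw [List.dropWhile_cons, if_pos (by simpa using ha)] at h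
        exact ih h

-- B's scan with a nonempty, '*'-free marker: exactly A's trimmed pieces
theorem pvScanB_eq (s : List Char) (hs : s ≠ []) (hstar : '*' ∉ s) (T : List Char) :
    pvScanB s T = (pvSplitStar T).flatMap (pvTrimA s) := by
  suffices H : ∀ n (T : List Char), T.length ≤ n → pvScanB s T = (pvSplitStar T).flatMap (pvTrimA s) from
    H T.length T le_rfl
  intro n
  induction n with
  | zero =>
      intro T hT
      have hTnil : T = [] := by cases T <;> simp_all
      subst hTnil
      simp [pvScanB_nil_t, hs, pvSplitStar, pvTrimA_nil s hs]
  | succ n ih =>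
      intro T hT
      cases T with
      | nil => simp [pvScanB_nil_t, hs, pvSplitStar, pvTrimA_nil s hs]
      | cons c T' =>
          by_cases hc : c = '*'
          · subst hc
            rw [pvScanB_star s T' hs hstar, ih T' (by simp at hT; omega)]
            have : pvSplitStar ('*' :: T') = [] :: pvSplitStar T' := by simp [pvSplitStar]
            rw [this, List.flatMap_cons, pvTrimA_nil s hs, List.nil_append]
          · by_cases hp : s.isPrefixOf (c :: T')
            · obtain ⟨rest, hrest⟩ := List.isPrefixOf_iff_prefix.mp hp
              rw [pvScanB_prefix s _ hs hp]
              rw [← hrest] at hT ⊢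
              rw [List.drop_left]
              have hTWdecomp : (s ++ rest).takeWhile (· ≠ '*') = s ++ rest.takeWhile (· ≠ '*') :=
                pvTW_append s rest hstar
              have hDWdecomp : (s ++ rest).dropWhile (· ≠ '*') = rest.dropWhile (· ≠ '*') :=
                pvDW_append s rest hstar
              have hsplit : s ++ rest
                  = (s ++ rest.takeWhile (· ≠ '*')) ++ rest.dropWhile (· ≠ '*') := by
                rw [List.append_assoc, List.takeWhile_append_dropWhile]
              have hdropm : (s ++ rest).drop (s ++ rest.takeWhile (· ≠ '*')).length
                  = rest.dropWhile (· ≠ '*') := by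
                conv_lhs => rw [hsplit]
                exact List.drop_left
              rw [hdropm]
              rw [pvSplitStar_decomp (s ++ rest), hTWdecomp, hDWdecomp]
              have htrim : pvTrimA s (s ++ rest.takeWhile (· ≠ '*')) = [s ++ rest.takeWhile (· ≠ '*')] :=
                pvTrimA_of_prefix s _ (List.isPrefixOf_iff_prefix.mpr ⟨_, rfl⟩)
              cases hdw : rest.dropWhile (· ≠ '*') with
              | nil =>
                  simp [pvScanB_nil_t, hs, htrim]
                  simpa using htrim.symm
              | cons d r =>
                  have hd : d = '*' := pvDW_head rest d r hdw
                  subst hd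
                  rw [pvScanB_star s r hs hstar]
                  have hlen : r.length ≤ n := by
                    have h1 : rest.length = (rest.takeWhile (· ≠ '*')).length + ('*' :: r).length := by
                      conv_lhs => rw [← List.takeWhile_append_dropWhile (p := (· ≠ '*')) (l := rest)]
                      rw [hdw, List.length_append]
                    have h2 : 1 ≤ s.length := by
                      cases s with
                      | nil => exact absurd rfl hs
                      | cons _ _ => simp
                    simp only [List.length_cons, List.length_append] at h1 hT
                    omega
                  rw [ih r hlen, List.flatMap_cons, htrim]
                  simp [htrim]
            · rw [pvScanB_not_prefix s c T' hp, ih T' (by simp at hT; omega)]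
              rw [pvSplitStar_decomp (c :: T'), pvSplitStar_decomp T']
              rw [List.takeWhile_cons, if_pos (by simpa using hc),
                List.dropWhile_cons, if_pos (by simpa using hc)]
              rw [List.flatMap_cons, List.flatMap_cons]
              have hnp : ¬ s.isPrefixOf (c :: T'.takeWhile (· ≠ '*')) := by
                intro h
                apply hp
                apply List.isPrefixOf_iff_prefix.mpr
                exact (List.isPrefixOf_iff_prefix.mp h).trans
                  (List.cons_prefix_cons.mpr ⟨rfl, List.takeWhile_prefix _⟩)
              rw [pvTrimA_cons_of_not_prefix s _ c hnp]

theorem pvScanB_nil_star (t : List Char) : pvScanB [] ('*' :: t) = [] :: pvScanB [] t := by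
  rw [pvScanB]; simp

theorem pvScanB_nil_cons (c : Char) (hc : c ≠ '*') (t : List Char) :
    pvScanB [] (c :: t)
      = (c :: t.takeWhile (· ≠ '*')) :: pvScanB [] (t.dropWhile (· ≠ '*')) := by
  rw [pvScanB]
  have h1 : ([] : List Char).isPrefixOf (c :: t) = true := by simp
  have htw : (c :: t).takeWhile (· ≠ '*') = c :: t.takeWhile (· ≠ '*') := by
    rw [List.takeWhile_cons, if_pos (by simpa using hc)]
  have hdrop : (c :: t).drop (c :: t.takeWhile (· ≠ '*')).length = t.dropWhile (· ≠ '*') := by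
    have : c :: t = (c :: t.takeWhile (· ≠ '*')) ++ t.dropWhile (· ≠ '*') := by
      simp [List.takeWhile_append_dropWhile]
    conv_lhs => rw [this]
    exact List.drop_left
  simp only [h1, List.drop_nil, List.drop_zero, List.nil_append, List.length_nil, dite_true]
  rw [dif_neg (by simp [htw, hc])]
  rw [htw, hdrop]

-- B's scan with the empty marker: the pieces, padded with an empty match after each nonempty one
theorem pvScanB_nil (T : List Char) :
    pvScanB [] T = (pvSplitStar T).flatMap pvPad := by
  suffices H : ∀ n (T : List Char), T.length ≤ n → pvScanB [] T = (pvSplitStar T).flatMap pvPad from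
    H T.length T le_rfl
  intro n
  induction n with
  | zero =>
      intro T hT
      have hTnil : T = [] := by cases T <;> simp_all
      subst hTnil
      simp [pvScanB_nil_t, pvSplitStar, pvPad]
  | succ n ih =>
      intro T hT
      cases T with
      | nil => simp [pvScanB_nil_t, pvSplitStar, pvPad]
      | cons c T' =>
          by_cases hc : c = '*'
          · subst hc
            rw [pvScanB_nil_star, ih T' (by simp at hT; omega)]
            have : pvSplitStar ('*' :: T') = [] :: pvSplitStar T' := by simp [pvSplitStar]
            rw [this, List.flatMap_cons]
            simp [pvPad]
          · rw [pvScanB_nil_cons c hc T']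
            rw [pvSplitStar_decomp (c :: T')]
            rw [List.takeWhile_cons, if_pos (by simpa using hc),
              List.dropWhile_cons, if_pos (by simpa using hc)]
            rw [List.flatMap_cons]
            have hpadm : pvPad (c :: T'.takeWhile (· ≠ '*')) = [c :: T'.takeWhile (· ≠ '*'), []] := by
              simp [pvPad]
            rw [hpadm]
            cases hdw : T'.dropWhile (· ≠ '*') with
            | nil => simp [pvScanB_nil_t]
            | cons d r =>
                have hd : d = '*' := pvDW_head T' d r hdw
                subst hd
                rw [pvScanB_nil_star]
                have hlen : r.length ≤ n := by
                  have h1 : T'.length = (T'.takeWhile (· ≠ '*')).length + ('*' :: r).length := by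
                    conv_lhs => rw [← List.takeWhile_append_dropWhile (p := (· ≠ '*')) (l := T')]
                    rw [hdw, List.length_append]
                  simp only [List.length_cons] at h1 hT
                  omega
                rw [ih r hlen]
                simp

-- the padding empty matches never change the first maximum by length
theorem pvFoldl_pad (f : Option (List Char) → List Char → Option (List Char))
    (h1 : ∀ acc x, f acc x ≠ none)
    (h2 : ∀ m, f (some m) [] = some m)
    (xs : List (List Char)) :
    ∀ acc, List.foldl f acc (xs.flatMap pvPad) = List.foldl f acc xs := by
  induction xs with
  | nil => intro acc; simp
  | cons g xs ih =>
      intro acc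
      rw [List.flatMap_cons, List.foldl_append, ih, List.foldl_cons]
      congr 1
      by_cases hg : g = []
      · simp [pvPad, hg]
      · simp only [pvPad, if_neg hg]
        rw [List.foldl_cons, List.foldl_cons, List.foldl_nil]
        obtain ⟨m, hm⟩ := Option.ne_none_iff_exists'.mp (h1 acc g)
        rw [hm, h2]

theorem pvMax_pad (xs : List (List Char)) :
    PySem.List.max? (xs.flatMap pvPad) (fun t => t.length)
      = PySem.List.max? xs (fun t => t.length) := by
  unfold PySem.List.max?
  refine pvFoldl_pad _ ?_ ?_ xs none
  · intro acc x
    cases acc with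
    | none => simp
    | some m =>
        show ¬ (if m.length < x.length then some x else some m) = none
        split <;> simp
  · intro m; simp

-- with a marker that never occurs in the text, B's scan finds nothing
theorem pvScanB_no_occ (s : List Char) (hs : s ≠ []) :
    ∀ T : List Char, ¬ (s <:+: T) → pvScanB s T = [] := by
  intro T
  induction T with
  | nil => intro _; simp [pvScanB_nil_t, hs]
  | cons c T' ih =>
      intro hocc
      have hnp : ¬ s.isPrefixOf (c :: T') := by
        intro h
        exact hocc (List.isPrefixOf_iff_prefix.mp h).isInfix
      rw [pvScanB_not_prefix s c T' hnp]
      exact ih (fun h => hocc (List.infix_cons h))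

-- the pieces of the '*'-split contain no '*'
theorem pvSplitStar_no_star (T : List Char) : ∀ g ∈ pvSplitStar T, '*' ∉ g := by
  induction T with
  | nil => simp [pvSplitStar]
  | cons c T' ih =>
      by_cases hc : c = '*'
      · subst hc
        simp only [pvSplitStar, if_pos rfl]
        intro g hg
        rcases List.mem_cons.mp hg with h | h
        · rw [h]; simp
        · exact ih g h
      · simp only [pvSplitStar, if_neg hc]
        cases hsp : pvSplitStar T' with
        | nil => exact absurd hsp (pvSplitStar_ne_nil T')
        | cons a b =>
            simp only [List.modifyHead]
            intro g hg
            rcases List.mem_cons.mp hg with h | h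
            · rw [h]
              intro hmem
              rcases List.mem_cons.mp hmem with h2 | h2
              · exact hc h2.symm
              · exact ih a (hsp ▸ List.mem_cons_self) h2
            · exact ih g (hsp ▸ List.mem_cons_of_mem a h)

-- with a '*'-containing marker, A's find never matches inside a piece
theorem pvTrimA_of_star_mem (s g : List Char) (hstar : '*' ∈ s) (hg : '*' ∉ g) :
    pvTrimA s g = [] := by
  have : ¬ (s <:+: g) := fun h => hg (h.mem hstar)
  simp [pvTrimA, (PySem.Chars.find_eq_neg_one_iff g s).mpr this]

-- ===== VERDICT (by name: the statement is the Claim_ definition above) =====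
theorem get_longest_aa_sequence_spec : Claim_equal_get_longest_aa_sequence := by
  intro aa ss _hdom hpre
  unfold Spec_get_longest_aa_sequence get_longest_aa_sequence get_longest_aa_sequence_alt
  dsimp only
  rw [pvSplitOn_star, pvFoldl_trim, List.nil_append]
  by_cases hstar : '*' ∈ ss.toList
  · -- the marker contains '*': Pre_ says it does not occur in the sequence; both sides are ""
    have hocc : ¬ (ss.toList <:+: aa.toList) := by
      rcases hpre with h | h
      · exact absurd hstar h
      · exact h
    have hs : ss.toList ≠ [] := by intro h0; rw [h0] at hstar; simp at hstar
    rw [pvScanB_no_occ ss.toList hs aa.toList hocc]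
    have htrim : (pvSplitStar aa.toList).flatMap (pvTrimA ss.toList) = [] := by
      apply List.flatMap_eq_nil_iff.mpr
      intro g hg
      exact pvTrimA_of_star_mem ss.toList g hstar (pvSplitStar_no_star aa.toList g hg)
    rw [htrim]
  by_cases hss : ss.toList = []
  · rw [hss] at *
    rw [pvScanB_nil, pvMax_pad]
    have htrim : pvTrimA ([] : List Char) = fun g => [g] := by
      funext g
      have hfind : PySem.Chars.find g [] = 0 := by
        cases g <;> simp [PySem.Chars.find, PySem.Chars.find.go, List.isPrefixOf]
      simp [pvTrimA, hfind]
    rw [htrim]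
    have : (pvSplitStar aa.toList).flatMap (fun g => [g]) = pvSplitStar aa.toList := by
      simp
    rw [this]
  · rw [pvScanB_eq ss.toList hss hstar]
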